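-- pv_equiv track=rewrite | github.com/xmercerweiss/Timeclock | src/cli.py | generate_separator
-- ===== SOURCE A (Python) =====
-- SEP = "-"
--
-- WALL = "|"
--
-- INTERSECT = "+"
--
-- def generate_separator(row):
-- 	output = ""
-- 	length = len(row)
-- 	intersections = [i for i, c in enumerate(row) if c == WALL]
-- 	old = 0
-- 	for index in intersections:
-- 		new = index - old
-- 		output += (SEP * new) + INTERSECT
-- 		old = index + 1
-- 	else:
-- 		output += SEP * (length - old)
-- 	return output
-- ===== SOURCE B (Python) =====
-- SEP = "-"
--
-- WALL = "|"
--
-- INTERSECT = "+"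
--
-- def generate_separator(row):
--     return "".join(INTERSECT if c == WALL else SEP for c in row)
-- ===== Notes on version B (the rewrite author's own statement) =====
-- stated objective: simpler
-- what changed: B maps each character of row directly to INTERSECT or SEP in one join pass, replacing A's two-phase scheme of collecting wall indices and then concatenating SEP-runs between them.
import Mathlib
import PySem

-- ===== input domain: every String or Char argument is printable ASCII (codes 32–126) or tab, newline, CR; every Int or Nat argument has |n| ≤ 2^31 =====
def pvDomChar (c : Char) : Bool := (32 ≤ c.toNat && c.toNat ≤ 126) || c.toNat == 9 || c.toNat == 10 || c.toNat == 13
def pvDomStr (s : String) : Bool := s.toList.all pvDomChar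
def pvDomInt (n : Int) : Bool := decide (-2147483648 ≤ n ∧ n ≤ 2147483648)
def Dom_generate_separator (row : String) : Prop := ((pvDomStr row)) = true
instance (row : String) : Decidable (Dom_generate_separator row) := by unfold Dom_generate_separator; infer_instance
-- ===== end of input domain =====

-- B replaces A's two-phase wall-index collection + run emission by a single per-character map; objective: simpler.

-- ===== PORT A =====
def generate_separator (row : String) : String :=
  let cs := row.toList
  let length : Int := cs.length
  let intersections : List Int :=
    ((PySem.List.enumerate cs 0).filter (fun p => p.2 == '|')).map Prod.fst
  let st := intersections.foldl
    (fun (st : List Char × Int) index =>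
      let new := index - st.2
      (st.1 ++ PySem.List.pyRepeat ['-'] new ++ ['+'], index + 1))
    ([], 0)
  String.mk (st.1 ++ PySem.List.pyRepeat ['-'] (length - st.2))

-- ===== PORT B =====
def generate_separator_alt (row : String) : String :=
  String.mk (row.toList.map (fun c => if c == '|' then '+' else '-'))

-- ===== PRECONDITION & SPEC =====
def Spec_generate_separator (row : String) (out : String) : Prop := out = generate_separator_alt row
instance (row : String) (out : String) : Decidable (Spec_generate_separator row out) := by unfold Spec_generate_separator; infer_instance

-- ===== CLAIM (what is proved, stated in full; the proofs are below) =====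
def Claim_equal_generate_separator : Prop := ∀ (row : String), Dom_generate_separator row → Spec_generate_separator row (generate_separator row)

-- ===== LEMMAS AND PROOFS =====

lemma sep_key : ∀ (l acc : List Char) (old s : Int), old ≤ s →
    ((((PySem.List.enumerate l s).filter (fun p => p.2 == '|')).map Prod.fst).foldl
        (fun (st : List Char × Int) index =>
          (st.1 ++ PySem.List.pyRepeat ['-'] (index - st.2) ++ ['+'], index + 1))
        (acc, old)
      |> fun st => st.1 ++ PySem.List.pyRepeat ['-'] (s + l.length - st.2))
    = acc ++ PySem.List.pyRepeat ['-'] (s - old)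
        ++ l.map (fun c => if c == '|' then '+' else '-') := by
  intro l
  induction l with
  | nil =>
    intro acc old s h
    simp [PySem.List.enumerate_nil, PySem.List.pyRepeat_singleton]
  | cons c l ih =>
    intro acc old s h
    by_cases hc : c = '|'
    · subst hc
      simp only [PySem.List.enumerate_cons, List.filter_cons, List.map_cons, List.foldl_cons,
        beq_self_eq_true, if_pos, List.length_cons]
      have := ih (acc ++ PySem.List.pyRepeat ['-'] (s - old) ++ ['+']) (s + 1) (s + 1) le_rfl
      simp only [sub_self] at this
      simp only [PySem.List.pyRepeat_singleton] at this ⊢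
      have harith : s + (↑l.length + 1) = (s + 1) + ↑l.length := by ring
      rw [show ((l.length : Int) + 1) = ((l.length + 1 : Nat) : Int) by push_cast; ring] at harith
      rw [harith, this]
      simp [Int.toNat_zero]
    · have hbc : (c == '|') = false := by simp [hc]
      simp only [PySem.List.enumerate_cons, List.filter_cons, hbc, Bool.false_eq_true,
        if_false, List.length_cons]
      have := ih acc old (s + 1) (by omega)
      simp only [PySem.List.pyRepeat_singleton] at this ⊢
      have harith : s + ((l.length : Int) + 1) = (s + 1) + ↑l.length := by ring
      rw [show ((l.length : Int) + 1) = ((l.length + 1 : Nat) : Int) by push_cast; ring] at harith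
      rw [harith, this]
      have h1 : (s + 1 - old).toNat = (s - old).toNat + 1 := by omega
      rw [h1, List.replicate_succ']
      simp [hc]

-- ===== VERDICT (by name: the statement is the Claim_ definition above) =====
theorem generate_separator_spec : Claim_equal_generate_separator := by
  intro row _
  unfold Spec_generate_separator generate_separator generate_separator_alt
  have := sep_key row.toList [] 0 0 le_rfl
  simp only [sub_self, PySem.List.pyRepeat_singleton, Int.toNat_zero, List.replicate_zero,
    List.nil_append, zero_add] at this ⊢
  rw [this]
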